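-- pv_equiv track=rewrite | github.com/Mvk122/Leetcode-Solutions | mostbeautiful.py | maximumBeauty_slow
-- ===== SOURCE A (Python) =====
-- def maximumBeauty_slow(items, queries):
--     answers = []
--     for query in queries:
--         best = 0
--         for item in items:
--             if item[0] <= query and item[1] > best:
--                 best = item[1]
--         answers.append(best)
--     return answers
-- ===== SOURCE B (Python) =====
-- def maximumBeauty_slow(items, queries):
--     # Sort items by price, compute running (prefix) maxima of beauty,
--     # then answer each query with a binary search (bisect_right) on prices.
--     items_sorted = sorted(items, key=lambda item: item[0])
--     prices = [item[0] for item in items_sorted]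
--     prefmax = [0]
--     for item in items_sorted:
--         prefmax.append(max(prefmax[-1], item[1]))
--     answers = []
--     for q in queries:
--         lo, hi = 0, len(prices)
--         while lo < hi:
--             mid = (lo + hi) // 2
--             if q < prices[mid]:
--                 hi = mid
--             else:
--                 lo = mid + 1
--         answers.append(prefmax[lo])
--     return answers
-- ===== Notes on version B (the rewrite author's own statement) =====
-- stated objective: faster
-- what changed: Replaces A's linear scan of all items per query with a one-time sort of items by price plus a prefix-maximum beauty array, answering each query by binary search (bisect_right) on the sorted prices.
-- outside the precondition, e.g. on maximumBeauty_slow([[5]], [1]): A returns [0], B raises IndexError; on maximumBeauty_slow([[5]], []): A returns [], B raises IndexError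
import Mathlib
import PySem

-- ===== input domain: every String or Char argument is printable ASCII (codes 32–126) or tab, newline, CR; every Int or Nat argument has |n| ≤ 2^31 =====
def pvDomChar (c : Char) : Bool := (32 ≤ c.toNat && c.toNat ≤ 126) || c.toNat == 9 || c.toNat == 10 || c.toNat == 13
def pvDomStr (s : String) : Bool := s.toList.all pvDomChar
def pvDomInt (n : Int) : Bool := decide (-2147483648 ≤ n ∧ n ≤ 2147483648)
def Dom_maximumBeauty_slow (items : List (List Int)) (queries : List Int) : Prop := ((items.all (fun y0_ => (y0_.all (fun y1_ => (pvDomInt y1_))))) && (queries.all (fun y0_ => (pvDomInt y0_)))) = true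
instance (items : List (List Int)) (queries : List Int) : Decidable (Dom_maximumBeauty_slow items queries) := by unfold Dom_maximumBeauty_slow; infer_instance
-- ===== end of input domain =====

-- B replaces A's per-query linear scan by sort + prefix maxima + binary search (objective: faster, O(Q*N) → O((N+Q) log N)).

-- ===== PORT A =====
def maximumBeauty_slow (items : List (List Int)) (queries : List Int) : List Int :=
  queries.foldl (fun answers query =>
    answers ++ [items.foldl (fun best item =>
      match PySem.List.pyGet? item 0 with
      | some p =>
        if p ≤ query then
          match PySem.List.pyGet? item 1 with
          | some b => if b > best then b else best
          | none => best            -- IndexError in Python; outside Pre_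
        else best
      | none => best                -- IndexError in Python; outside Pre_
      ) 0]) []

-- ===== PORT B =====
def maximumBeauty_slow_alt (items : List (List Int)) (queries : List Int) : List Int :=
  let itemsSorted := PySem.List.sorted items (fun item => PySem.List.pyGetD item 0 0)
  let prices := itemsSorted.map (fun item => PySem.List.pyGetD item 0 0)
  let prefmax := itemsSorted.foldl
    (fun acc item => acc ++ [max (PySem.List.pyGetD acc (-1) 0) (PySem.List.pyGetD item 1 0)]) [0]
  queries.foldl (fun answers q =>
    answers ++ [PySem.List.pyGetD prefmax ((PySem.List.bisectRight prices q : Nat) : Int) 0]) []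

-- ===== PRECONDITION & SPEC =====
-- Pre_ excludes items with fewer than 2 entries: on those B always raises IndexError
-- (it reads item[0] and item[1] unconditionally) while A raises for most queries but
-- can still return when item[0] > every query or queries is empty.
def Pre_maximumBeauty_slow (items : List (List Int)) (queries : List Int) : Prop :=
  ∀ item ∈ items, 2 ≤ item.length
instance (items : List (List Int)) (queries : List Int) : Decidable (Pre_maximumBeauty_slow items queries) := by unfold Pre_maximumBeauty_slow; infer_instance
def pvWitness_maximumBeauty_slow : List (List Int) × List Int := ([[1, 2], [3, 4]], [0, 2, 5])

def Spec_maximumBeauty_slow (items : List (List Int)) (queries : List Int) (out : List Int) : Prop := out = maximumBeauty_slow_alt items queries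
instance (items : List (List Int)) (queries : List Int) (out : List Int) : Decidable (Spec_maximumBeauty_slow items queries out) := by unfold Spec_maximumBeauty_slow; infer_instance

-- ===== CLAIM (what is proved, stated in full; the proofs are below) =====
def Claim_equal_maximumBeauty_slow : Prop := ∀ (items : List (List Int)) (queries : List Int), Dom_maximumBeauty_slow items queries → Pre_maximumBeauty_slow items queries → Spec_maximumBeauty_slow items queries (maximumBeauty_slow items queries)

-- ===== LEMMAS AND PROOFS =====

-- item[1] (beauty) and item[0] (price), total via the Python default-free read under Pre_
def pvBeauty (item : List Int) : Int := PySem.List.pyGetD item 1 0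
def pvPrice (item : List Int) : Int := PySem.List.pyGetD item 0 0
-- running maximum of beauties
def pvF (init : Int) (l : List (List Int)) : Int :=
  l.foldl (fun a it => max a (pvBeauty it)) init

lemma pvF_perm (init : Int) {l m : List (List Int)} (h : l.Perm m) :
    pvF init l = pvF init m := by
  exact List.Perm.foldl_eq (rcomm := ⟨fun a x y => by
    simp [max_assoc, max_comm (pvBeauty x)]⟩) h init

-- A's inner loop, written with an if, equals pvF over the filtered list
lemma foldl_if_filter (q : Int) (l : List (List Int)) (init : Int) :
    l.foldl (fun a it => if pvPrice it ≤ q then max a (pvBeauty it) else a) init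
      = pvF init (l.filter (fun it => decide (pvPrice it ≤ q))) := by
  induction l generalizing init with
  | nil => simp [pvF]
  | cons x xs ih =>
    by_cases h : pvPrice x ≤ q <;> simp [h, List.filter, pvF, List.foldl] <;>
      simpa [pvF] using ih _

-- under Pre_, A's match-form inner step is the if-form step
lemma a_inner_eq (q : Int) (items : List (List Int))
    (hpre : ∀ item ∈ items, 2 ≤ item.length) :
    items.foldl (fun best item =>
      match PySem.List.pyGet? item 0 with
      | some p =>
        if p ≤ q then
          match PySem.List.pyGet? item 1 with
          | some b => if b > best then b else best
          | none => best
        else best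
      | none => best) 0
    = pvF 0 (items.filter (fun it => decide (pvPrice it ≤ q))) := by
  rw [PySem.List.foldl_congr_mem items _
      (fun a it => if pvPrice it ≤ q then max a (pvBeauty it) else a) 0 ?_]
  · exact foldl_if_filter q items 0
  · intro acc x hx
    have hlen := hpre x hx
    rcases x with _ | ⟨p, x⟩
    · simp at hlen
    rcases x with _ | ⟨b, rest⟩
    · simp at hlen
    have h0 : PySem.List.pyGet? (p :: b :: rest) 0 = some p := by
      rw [show ((0 : Int)) = ((0 : Nat) : Int) from rfl, PySem.List.pyGet?_natCast]; simp
    have h1 : PySem.List.pyGet? (p :: b :: rest) 1 = some b := by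
      rw [show ((1 : Int)) = ((1 : Nat) : Int) from rfl, PySem.List.pyGet?_natCast]; simp
    have hp : pvPrice (p :: b :: rest) = p := by
      simp [pvPrice, PySem.List.pyGetD, h0]
    have hb : pvBeauty (p :: b :: rest) = b := by
      simp [pvBeauty, PySem.List.pyGetD]
    simp only [h0, h1, hp, hb]
    by_cases hc : p ≤ q <;> simp [hc, max_def] <;> omega

-- the prefix-max list built by B's fold, characterised
def pvPrefFold (l : List (List Int)) : List Int :=
  l.foldl (fun acc item => acc ++ [max (PySem.List.pyGetD acc (-1) 0) (PySem.List.pyGetD item 1 0)]) [0]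

lemma prefFold_eq (l : List (List Int)) :
    pvPrefFold l = (List.range (l.length + 1)).map (fun i => pvF 0 (l.take i)) := by
  induction l using List.reverseRecOn with
  | nil => simp [pvPrefFold, pvF]
  | append_singleton xs x ih =>
    have hne : pvPrefFold xs ≠ [] := by
      rw [ih]; simp
    have hlast : PySem.List.pyGetD (pvPrefFold xs) (-1) 0 = pvF 0 xs := by
      rw [PySem.List.pyGetD_neg_one _ _ hne]
      rw [List.getLast_eq_getElem]
      have hlen : (pvPrefFold xs).length = xs.length + 1 := by rw [ih]; simp
      have : ∀ (h : (pvPrefFold xs).length - 1 < (pvPrefFold xs).length),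
          (pvPrefFold xs)[(pvPrefFold xs).length - 1] = pvF 0 xs := by
        intro h
        have h2 : (pvPrefFold xs)[(pvPrefFold xs).length - 1]'h
            = ((List.range (xs.length + 1)).map (fun i => pvF 0 (xs.take i)))[xs.length]'(by simp) := by
          congr 1 <;> simp [ih]
        rw [h2]; simp
      exact this _
    have hstep : pvPrefFold (xs ++ [x]) = pvPrefFold xs ++ [max (pvF 0 xs) (PySem.List.pyGetD x 1 0)] := by
      simp [pvPrefFold, List.foldl_append]
      rw [show (List.foldl (fun acc item => acc ++ [max (PySem.List.pyGetD acc (-1) 0) (PySem.List.pyGetD item 1 0)]) [0] xs) = pvPrefFold xs from rfl, hlast]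
    rw [hstep, ih]
    have hr : List.range ((xs ++ [x]).length + 1) = List.range (xs.length + 1) ++ [xs.length + 1] := by
      simp [List.range_succ]
    rw [hr, List.map_append]
    congr 1
    · apply List.map_congr_left
      intro i hi
      simp only [List.mem_range] at hi
      rw [List.take_append_of_le_length (by omega)]
    · have ht : (xs ++ [x]).take (xs.length + 1) = xs ++ [x] := by
        apply List.take_of_length_le; simp
      simp [ht, pvF, pvBeauty]

-- index into the prefix-max list
lemma prefFold_get (l : List (List Int)) (k : Nat) (hk : k ≤ l.length) :
    PySem.List.pyGetD (pvPrefFold l) ((k : Nat) : Int) 0 = pvF 0 (l.take k) := by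
  rw [PySem.List.pyGetD_natCast, prefFold_eq]
  rw [List.getD_eq_getElem?_getD]
  rw [List.getElem?_eq_getElem (by simp; omega)]
  simp

-- sorted prefix: the filter over the sorted list is exactly its first k elements
lemma filter_sorted_eq_take (q : Int) (l : List (List Int)) (k : Nat)
    (hk : k ≤ l.length)
    (hle : ∀ (j : Nat) (hj : j < l.length), j < k → pvPrice l[j] ≤ q)
    (hgt : ∀ (j : Nat) (hj : j < l.length), k ≤ j → q < pvPrice l[j]) :
    l.filter (fun it => decide (pvPrice it ≤ q)) = l.take k := by
  conv_lhs => rw [← List.take_append_drop k l]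
  rw [List.filter_append]
  have h1 : (l.take k).filter (fun it => decide (pvPrice it ≤ q)) = l.take k := by
    rw [List.filter_eq_self]
    intro a ha
    rw [List.mem_iff_getElem] at ha
    obtain ⟨j, hj, rfl⟩ := ha
    have hjlen : j < l.length := by simp at hj; omega
    have hjk : j < k := by simp at hj; omega
    have : (l.take k)[j]'hj = l[j]'hjlen := List.getElem_take
    rw [this]
    simpa using hle j hjlen hjk
  have h2 : (l.drop k).filter (fun it => decide (pvPrice it ≤ q)) = [] := by
    rw [List.filter_eq_nil_iff]
    intro a ha
    rw [List.mem_iff_getElem] at ha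
    obtain ⟨j, hj, rfl⟩ := ha
    have hjlen : k + j < l.length := by simp at hj; omega
    have : (l.drop k)[j]'hj = l[k + j]'hjlen := by
      simp [List.getElem_drop]
    rw [this]
    simp only [decide_eq_true_eq, not_le]
    exact hgt (k + j) hjlen (by omega)
  rw [h1, h2, List.append_nil]

-- ===== VERDICT (by name: the statement is the Claim_ definition above) =====
theorem maximumBeauty_slow_spec : Claim_equal_maximumBeauty_slow := by
  unfold Claim_equal_maximumBeauty_slow
  intro items queries hdom hpre
  unfold Spec_maximumBeauty_slow maximumBeauty_slow maximumBeauty_slow_alt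
  rw [PySem.List.foldl_append_singleton_eq_map, PySem.List.foldl_append_singleton_eq_map]
  simp only [List.nil_append]
  apply List.map_congr_left
  intro q hq
  set key : List Int → Int := fun item => PySem.List.pyGetD item 0 0 with hkey
  set ls := PySem.List.sorted items key with hls
  have hperm : ls.Perm items := PySem.List.sorted_perm items key false
  set prices := ls.map key with hprices
  have hsorted : prices.Pairwise (· ≤ ·) := PySem.List.sorted_map_key_pairwise items key
  set k := PySem.List.bisectRight prices q with hkdef
  obtain ⟨hk1, hk2, hk3⟩ := PySem.List.bisectRight_spec prices q hsorted
  have hpl : prices.length = ls.length := by simp [hprices]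
  have hklen : k ≤ ls.length := hpl ▸ hk1
  have hle : ∀ (j : Nat) (hj : j < ls.length), j < k → pvPrice ls[j] ≤ q := by
    intro j hj hjk
    have h := hk2 j (by omega) hjk
    simpa [hprices, List.getElem_map, pvPrice, hkey] using h
  have hgt : ∀ (j : Nat) (hj : j < ls.length), k ≤ j → q < pvPrice ls[j] := by
    intro j hj hjk
    have h := hk3 j (by omega) hjk
    simpa [hprices, List.getElem_map, pvPrice, hkey] using h
  rw [a_inner_eq q items hpre]
  have hfilter := pvF_perm 0 ((hperm.filter (fun it => decide (pvPrice it ≤ q))).symm)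
  rw [hfilter, filter_sorted_eq_take q ls k hklen hle hgt]
  rw [show (List.foldl (fun acc item => acc ++ [max (PySem.List.pyGetD acc (-1) 0) (PySem.List.pyGetD item 1 0)]) [0] ls) = pvPrefFold ls from rfl]
  rw [prefFold_get ls k hklen]
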